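-- pv_equiv track=rewrite | github.com/ourprochoi-web/ai-blog-generator | backend/app/services/generators/blog_writer.py | _extract_string_value
-- ===== SOURCE A (Python) =====
-- from typing import Any, Dict, List, Optional
--
-- def _extract_string_value(text: str) -> Optional[str]:
--     """
--     Extract a JSON string value starting with opening quote.
--     Handles escaped quotes properly.
--     """
--     if not text.startswith('"'):
--         return None
--
--     result = []
--     i = 1  # Skip opening quote
--     while i < len(text):
--         char = text[i]
--         if char == '\\' and i + 1 < len(text):
--             # Escape sequence
--             next_char = text[i + 1]
--             if next_char == '"':
--                 result.append('"')
--             elif next_char == 'n':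
--                 result.append('\n')
--             elif next_char == 't':
--                 result.append('\t')
--             elif next_char == '\\':
--                 result.append('\\')
--             else:
--                 result.append(next_char)
--             i += 2
--         elif char == '"':
--             # End of string
--             return ''.join(result)
--         else:
--             result.append(char)
--             i += 1
--
--     # String was truncated - return what we have
--     return ''.join(result) if len(result) > 100 else None
-- ===== SOURCE B (Python) =====
-- from typing import Optional
--
-- _ESCAPES = {'"': '"', 'n': '\n', 't': '\t', '\\': '\\'}
--
-- def _locate_end(text: str) -> Optional[int]:
--     """Index of the first unescaped '"' after position 0, or None."""
--     i = 1
--     n = len(text)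
--     while i < n:
--         if text[i] == '\\' and i + 1 < n:
--             i += 2
--         elif text[i] == '"':
--             return i
--         else:
--             i += 1
--     return None
--
-- def _decode(body: str) -> str:
--     out = []
--     i = 0
--     n = len(body)
--     while i < n:
--         c = body[i]
--         if c == '\\' and i + 1 < n:
--             out.append(_ESCAPES.get(body[i + 1], body[i + 1]))
--             i += 2
--         else:
--             out.append(c)
--             i += 1
--     return ''.join(out)
--
-- def _extract_string_value(text: str) -> Optional[str]:
--     if not text.startswith('"'):
--         return None
--     end = _locate_end(text)
--     if end is not None:
--         return _decode(text[1:end])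
--     decoded = _decode(text[1:])
--     return decoded if len(decoded) > 100 else None
-- ===== Notes on version B (the rewrite author's own statement) =====
-- stated objective: alternative
-- what changed: Single accumulate-while-scanning loop replaced by two separate passes: a locator that only finds the first unescaped closing quote, then a pure decoder over the located body (escape map as a dict); the truncated-string length test runs on the decoder's output.
import Mathlib
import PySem

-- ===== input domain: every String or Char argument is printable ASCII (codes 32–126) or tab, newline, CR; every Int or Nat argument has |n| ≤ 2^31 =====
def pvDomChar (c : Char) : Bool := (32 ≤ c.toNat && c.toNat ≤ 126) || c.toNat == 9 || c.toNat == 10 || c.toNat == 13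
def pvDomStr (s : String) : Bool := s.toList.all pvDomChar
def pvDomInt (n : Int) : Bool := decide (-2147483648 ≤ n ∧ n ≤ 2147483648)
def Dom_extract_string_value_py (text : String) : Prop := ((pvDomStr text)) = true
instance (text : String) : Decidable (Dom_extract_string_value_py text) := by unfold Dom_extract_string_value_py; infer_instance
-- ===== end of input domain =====

-- B replaces A's single accumulate-while-scanning loop by two separate passes (a locator
-- for the first unescaped closing quote, then a decoder with an escape map over the body);
-- objective: alternative decomposition, same cost.

-- ===== PORT A =====
-- A's escape branch chain (if next_char == '"' … elif 'n' … elif 't' … elif '\\' … else keep)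
def pvEscA (c : Char) : Char :=
  if c = '"' then '"'
  else if c = 'n' then '\n'
  else if c = 't' then '\t'
  else if c = '\\' then '\\'
  else c

-- A's while loop: state = remaining chars, accumulated result; returns (found closing quote?, result)
def pvALoop : List Char → List Char → Bool × List Char
  | [], acc => (false, acc)
  | '\\' :: c :: rest, acc => pvALoop rest (acc ++ [pvEscA c])
  | '"' :: _, acc => (true, acc)
  | c :: rest, acc => pvALoop rest (acc ++ [c])

def extract_string_value_py (text : String) : Option String :=
  if PySem.Str.startswith text "\"" then
    match pvALoop (text.toList.drop 1) [] with
    | (true, res) => some (String.ofList res)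
    | (false, res) => if 100 < res.length then some (String.ofList res) else none
  else none

-- ===== PORT B =====
-- Source B's _ESCAPES dict
def pvEscapes : PySem.Dict Char Char := PySem.Dict.ofList [('"', '"'), ('n', '\n'), ('t', '\t'), ('\\', '\\')]

-- Source B's _locate_end: offset (past the opening quote) of the first unescaped '"', none if absent
def pvLocate : List Char → Option Nat
  | [] => none
  | '\\' :: _ :: rest => (pvLocate rest).map (· + 2)
  | '"' :: _ => some 0
  | _ :: rest => (pvLocate rest).map (· + 1)

-- Source B's _decode: apply the escape map (trailing lone backslash kept literally)
def pvDecode : List Char → List Char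
  | [] => []
  | '\\' :: c :: rest => PySem.Dict.getD pvEscapes c c :: pvDecode rest
  | c :: rest => c :: pvDecode rest

def extract_string_value_py_alt (text : String) : Option String :=
  if PySem.Str.startswith text "\"" then
    match pvLocate (text.toList.drop 1) with
    | some k => some (String.ofList (pvDecode ((text.toList.drop 1).take k)))
    | none =>
      let d := pvDecode (text.toList.drop 1)
      if 100 < d.length then some (String.ofList d) else none
  else none

-- ===== PRECONDITION & SPEC =====
def Spec_extract_string_value_py (text : String) (out : Option String) : Prop := out = extract_string_value_py_alt text
instance (text : String) (out : Option String) : Decidable (Spec_extract_string_value_py text out) := by unfold Spec_extract_string_value_py; infer_instance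

-- ===== CLAIM (what is proved, stated in full; the proofs are below) =====
def Claim_equal_extract_string_value_py : Prop := ∀ (text : String), Dom_extract_string_value_py text → Spec_extract_string_value_py text (extract_string_value_py text)

-- ===== LEMMAS AND PROOFS =====
-- the dict lookup of B computes A's branch chain
theorem pvEsc_eq (c : Char) : PySem.Dict.getD pvEscapes c c = pvEscA c := by
  have h : pvEscapes = PySem.Dict.mk [('"', '"'), ('n', '\n'), ('t', '\t'), ('\\', '\\')] := by decide
  simp only [h, PySem.Dict.getD, PySem.Dict.get?_mk_cons, pvEscA]
  split_ifs <;> simp_all [@eq_comm Char, PySem.Dict.get?]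

-- loop invariant: A's loop = locate, then decode the part before the quote (all of it if none)
theorem pvALoop_eq (cs acc : List Char) :
    pvALoop cs acc =
      match pvLocate cs with
      | some k => (true, acc ++ pvDecode (cs.take k))
      | none => (false, acc ++ pvDecode cs) := by
  induction cs, acc using pvALoop.induct with
  | case1 acc => simp [pvALoop, pvLocate, pvDecode]
  | case2 c rest acc ih =>
    rw [pvALoop, ih]
    cases h : pvLocate rest <;>
      simp [pvLocate, pvDecode, h, pvEsc_eq, List.take_succ_cons]
  | case3 rest acc => simp [pvALoop, pvLocate, pvDecode]
  | case4 c rest acc h1 h2 ih =>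
    have hloc : pvLocate (c :: rest) = (pvLocate rest).map (· + 1) := by
      rw [pvLocate.eq_def]; cases rest <;> simp_all
    have hdec : pvDecode (c :: rest) = c :: pvDecode rest := by
      rw [pvDecode.eq_def]; cases rest <;> simp_all
    have hstep : pvALoop (c :: rest) acc = pvALoop rest (acc ++ [c]) := by
      rw [pvALoop.eq_def]; cases rest <;> simp_all
    have hne : c ≠ '\\' ∨ rest = [] := by
      cases rest with
      | nil => exact Or.inr rfl
      | cons d ds => exact Or.inl (fun hc => h1 d ds hc rfl)
    rw [hstep, ih, hloc]
    cases h : pvLocate rest with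
    | none => simp [hdec]
    | some k =>
      have htk : pvDecode (c :: rest.take k) = c :: pvDecode (rest.take k) := by
        rcases hne with hc | hr
        · rw [pvDecode.eq_def]; cases rest.take k <;> simp_all
        · subst hr; simp [pvLocate] at h
      simp [htk, List.take_succ_cons]

-- ===== VERDICT (by name: the statement is the Claim_ definition above) =====
theorem extract_string_value_py_spec : Claim_equal_extract_string_value_py := by
  intro text _
  unfold Spec_extract_string_value_py extract_string_value_py extract_string_value_py_alt
  by_cases hs : PySem.Str.startswith text "\"" = true
  · rw [if_pos hs, if_pos hs, pvALoop_eq]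
    cases pvLocate (text.toList.drop 1) <;> simp
  · rw [if_neg hs, if_neg hs]
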